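-- pv_equiv track=rewrite | github.com/aptxZS/ReinforcementLearning | Lab1/graph.py | constructFrequencyDict
-- ===== SOURCE A (Python) =====
-- def constructFrequencyDict(dist):
--   result = {}
--   for i in range(len(dist)):
--     for j in range(len(dist)):
--       if i != j and j > i:
--        key = dist[i][j]
--        if key in result:
--          result[key] += 1
--        else:
--          result[key] = 1
--   labels, values = [], []
--   for key in sorted(result):
--     labels.append(int(key))
--     values.append(result[key])
--   return labels, values
-- ===== SOURCE B (Python) =====
-- def constructFrequencyDict(dist):
--     n = len(dist)
--     entries = sorted(dist[i][j] for i in range(n) for j in range(i + 1, n))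
--     labels, values = [], []
--     i = 0
--     m = len(entries)
--     while i < m:
--         j = i + 1
--         while j < m and entries[j] == entries[i]:
--             j += 1
--         labels.append(int(entries[i]))
--         values.append(j - i)
--         i = j
--     return labels, values
-- ===== Notes on version B (the rewrite author's own statement) =====
-- stated objective: alternative
-- what changed: B flattens the upper triangle into one list, sorts it, and emits labels/counts by scanning maximal runs of equal values, instead of building a frequency dict and then sorting its keys.
import Mathlib
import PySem

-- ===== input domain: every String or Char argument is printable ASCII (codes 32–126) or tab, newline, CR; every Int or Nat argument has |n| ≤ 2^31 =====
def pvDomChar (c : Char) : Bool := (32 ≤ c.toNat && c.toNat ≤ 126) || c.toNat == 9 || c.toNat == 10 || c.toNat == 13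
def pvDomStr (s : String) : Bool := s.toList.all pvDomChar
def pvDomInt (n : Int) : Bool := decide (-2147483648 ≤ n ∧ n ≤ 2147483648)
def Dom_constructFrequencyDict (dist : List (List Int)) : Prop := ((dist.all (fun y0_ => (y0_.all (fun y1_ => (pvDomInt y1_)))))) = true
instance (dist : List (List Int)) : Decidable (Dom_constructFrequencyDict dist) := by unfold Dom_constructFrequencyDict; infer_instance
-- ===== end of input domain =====

-- B sorts the flat upper-triangle list and scans maximal runs of equal values instead of
-- building a frequency dict and sorting its keys (objective: alternative algorithm, same result).

-- ===== PORT A =====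
def constructFrequencyDict (dist : List (List Int)) : List Int × List Int :=
  let n : Int := dist.length
  let result : PySem.Dict Int Int :=
    (PySem.List.pyRange 0 n 1).foldl (fun r i =>
      (PySem.List.pyRange 0 n 1).foldl (fun r j =>
        if i ≠ j ∧ j > i then
          let key := PySem.List.pyGetD (PySem.List.pyGetD dist i []) j 0
          if r.contains key then r.insert key (r.getD key 0 + 1)
          else r.insert key 1
        else r) r) PySem.Dict.empty
  let sortedKeys := PySem.List.sorted result.keys (fun x => x)
  let labels := sortedKeys.foldl (fun acc key => acc ++ [key]) []
  let values := sortedKeys.foldl (fun acc key => acc ++ [result.getD key 0]) []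
  (labels, values)

-- ===== PORT B =====
-- B's inner while loop: advance j past the run of entries equal to entries[i]; the run has
-- length 1 + (length of the equal prefix of the tail), and the scan resumes after the run.
def pvRunScan : List Int → List Int × List Int
  | [] => ([], [])
  | x :: xs =>
    let run := xs.takeWhile (· == x)
    let rest := pvRunScan (xs.dropWhile (· == x))
    (x :: rest.1, (1 + (run.length : Int)) :: rest.2)
termination_by l => l.length
decreasing_by
  simpa using Nat.lt_succ_of_le (List.length_dropWhile_le (· == x) xs)

def constructFrequencyDict_alt (dist : List (List Int)) : List Int × List Int :=
  let n : Int := dist.length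
  let entries := PySem.List.sorted
    ((PySem.List.pyRange 0 n 1).flatMap (fun i =>
      (PySem.List.pyRange (i + 1) n 1).map (fun j =>
        PySem.List.pyGetD (PySem.List.pyGetD dist i []) j 0))) (fun x => x)
  pvRunScan entries

-- ===== PRECONDITION & SPEC =====
-- Pre_ excludes exactly the ragged inputs on which A raises IndexError: every row except
-- possibly the last must be at least as long as the matrix (dist[i][j] is read for all j > i).
def Pre_constructFrequencyDict (dist : List (List Int)) : Prop :=
  ∀ i : Fin dist.length, i.val + 1 < dist.length → dist.length ≤ dist[i].length
instance (dist : List (List Int)) : Decidable (Pre_constructFrequencyDict dist) := by unfold Pre_constructFrequencyDict; infer_instance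
def pvWitness_constructFrequencyDict : List (List Int) := [[0, 1], [5, 0]]
def Spec_constructFrequencyDict (dist : List (List Int)) (out : List Int × List Int) : Prop := out = constructFrequencyDict_alt dist
instance (dist : List (List Int)) (out : List Int × List Int) : Decidable (Spec_constructFrequencyDict dist out) := by unfold Spec_constructFrequencyDict; infer_instance

-- ===== CLAIM (what is proved, stated in full; the proofs are below) =====
def Claim_equal_constructFrequencyDict : Prop := ∀ (dist : List (List Int)), Dom_constructFrequencyDict dist → Pre_constructFrequencyDict dist → Spec_constructFrequencyDict dist (constructFrequencyDict dist)

-- ===== LEMMAS AND PROOFS =====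

theorem pv_step_eq_modify (d : PySem.Dict Int Int) (k : Int) :
    (if d.contains k then d.insert k (d.getD k 0 + 1) else d.insert k 1) = d.modify k 0 (· + 1) := by
  by_cases h : d.contains k
  · simp [h, PySem.Dict.modify, PySem.Dict.getD]
  · have h2 : d.get? k = none := by
      rw [PySem.Dict.get?_eq_none_iff_contains]; simpa using h
    simp [h, h2, PySem.Dict.modify, PySem.Dict.getD]

theorem pv_foldl_ite_false {α β : Type} (p : α → Prop) [DecidablePred p] (g : β → α → β)
    (l : List α) (r : β) (h : ∀ a ∈ l, ¬ p a) :
    l.foldl (fun r x => if p x then g r x else r) r = r := by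
  induction l generalizing r with
  | nil => rfl
  | cons a t ih =>
    simp only [List.foldl_cons, if_neg (h a (List.mem_cons_self))]
    exact ih r (fun a ha => h a (List.mem_cons_of_mem _ ha))

theorem pv_foldl_ite_true {α β : Type} (p : α → Prop) [DecidablePred p] (g : β → α → β)
    (l : List α) (r : β) (h : ∀ a ∈ l, p a) :
    l.foldl (fun r x => if p x then g r x else r) r = l.foldl g r := by
  induction l generalizing r with
  | nil => rfl
  | cons a t ih =>
    simp only [List.foldl_cons, if_pos (h a (List.mem_cons_self))]
    exact ih (g r a) (fun a ha => h a (List.mem_cons_of_mem _ ha))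

-- the nested A-loop builds the counter of the flat upper-triangle list
theorem pv_dict_eq_counter (e : Int → Int → Int) (n : Int) :
    ((PySem.List.pyRange 0 n 1).foldl (fun r i =>
      (PySem.List.pyRange 0 n 1).foldl (fun r j =>
        if i ≠ j ∧ j > i then
          (if r.contains (e i j) then r.insert (e i j) (r.getD (e i j) 0 + 1)
           else r.insert (e i j) 1)
        else r) r) PySem.Dict.empty) =
    PySem.Dict.counter ((PySem.List.pyRange 0 n 1).flatMap (fun i =>
      (PySem.List.pyRange (i + 1) n 1).map (e i))) := by
  rw [PySem.Dict.counter_eq_foldl]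
  have hin : ∀ (i : Int), 0 ≤ i → i < n → ∀ (r : PySem.Dict Int Int),
      (PySem.List.pyRange 0 n 1).foldl (fun r j =>
        if i ≠ j ∧ j > i then
          (if r.contains (e i j) then r.insert (e i j) (r.getD (e i j) 0 + 1)
           else r.insert (e i j) 1)
        else r) r =
      ((PySem.List.pyRange (i + 1) n 1).map (e i)).foldl
        (fun d x => d.modify x 0 (· + 1)) r := by
    intro i h0 hn r
    have hsplit : PySem.List.pyRange 0 n 1 =
        PySem.List.pyRange 0 (i + 1) 1 ++ PySem.List.pyRange (i + 1) n 1 :=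
      PySem.List.pyRange_one_append 0 (i + 1) n (by omega) (by omega)
    rw [hsplit, List.foldl_append]
    rw [pv_foldl_ite_false (fun j => i ≠ j ∧ j > i) _ _ r (by
      intro a ha
      have := (PySem.List.mem_pyRange_one).1 ha
      omega)]
    rw [pv_foldl_ite_true (fun j => i ≠ j ∧ j > i) _ _ r (by
      intro a ha
      have := (PySem.List.mem_pyRange_one).1 ha
      omega)]
    rw [List.foldl_map]
    exact PySem.List.foldl_congr_mem _ _ _ r (fun acc x _ => pv_step_eq_modify acc (e i x))
  have houter : ∀ (r : PySem.Dict Int Int),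
      (PySem.List.pyRange 0 n 1).foldl (fun r i =>
        (PySem.List.pyRange 0 n 1).foldl (fun r j =>
          if i ≠ j ∧ j > i then
            (if r.contains (e i j) then r.insert (e i j) (r.getD (e i j) 0 + 1)
             else r.insert (e i j) 1)
          else r) r) r =
      ((PySem.List.pyRange 0 n 1).flatMap (fun i =>
        (PySem.List.pyRange (i + 1) n 1).map (e i))).foldl
        (fun d x => d.modify x 0 (· + 1)) r := by
    intro r
    rw [PySem.List.foldl_congr_mem _ _ _ r (fun acc i hi => by
      have := (PySem.List.mem_pyRange_one).1 hi
      exact hin i this.1 this.2 acc)]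
    induction (PySem.List.pyRange 0 n 1) generalizing r with
    | nil => rfl
    | cons a t ih => simp only [List.foldl_cons, List.flatMap_cons, List.foldl_append, ih]
  exact houter PySem.Dict.empty

-- every element after the leading run of a sorted list is strictly greater than the head
theorem pv_dropWhile_gt (x : Int) (xs : List Int) (hs : (x :: xs).Pairwise (· ≤ ·))
    (z : Int) (hz : z ∈ xs.dropWhile (· == x)) : x < z := by
  have hle : x ≤ z := (List.pairwise_cons.1 hs).1 z ((xs.dropWhile_sublist (· == x)).subset hz)
  rcases lt_or_eq_of_le hle with h | h
  · exact h
  · exfalso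
    cases hd : xs.dropWhile (· == x) with
    | nil => rw [hd] at hz; exact absurd hz (List.not_mem_nil)
    | cons y ys =>
      have hy : ¬ (y == x) := by
        have := List.head_dropWhile_not (· == x) (l := xs) (by rw [hd]; simp)
        simpa [hd] using this
      have hxy : x ≤ y := (List.pairwise_cons.1 hs).1 y ((xs.dropWhile_sublist (· == x)).subset (by rw [hd]; exact List.mem_cons_self))
      have hyz : y ≤ z := by
        rw [hd] at hz
        rcases List.mem_cons.1 hz with rfl | hz'
        · exact le_refl _
        · have hp : (y :: ys).Pairwise (· ≤ ·) := by
            have := List.Pairwise.sublist (xs.dropWhile_sublist (· == x)) (List.pairwise_cons.1 hs).2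
            rwa [hd] at this
          exact (List.pairwise_cons.1 hp).1 z hz'
      have : y = x := le_antisymm (h ▸ hyz) hxy
      simp [this] at hy

-- characterisation of the run scan on a sorted list
theorem pv_runScan_sorted (S : List Int) (hs : S.Pairwise (· ≤ ·)) :
    ((pvRunScan S).1.Pairwise (· < ·)) ∧
    (∀ k, k ∈ (pvRunScan S).1 ↔ k ∈ S) ∧
    ((pvRunScan S).2 = (pvRunScan S).1.map (fun k => (S.count k : Int))) := by
  induction S using pvRunScan.induct with
  | case1 => simp [pvRunScan]
  | case2 x xs ih =>
    have hxs : xs.Pairwise (· ≤ ·) := (List.pairwise_cons.1 hs).2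
    have hd : (xs.dropWhile (· == x)).Pairwise (· ≤ ·) :=
      List.Pairwise.sublist (xs.dropWhile_sublist (· == x)) hxs
    obtain ⟨ih1, ih2, ih3⟩ := ih hd
    have hgt : ∀ z ∈ xs.dropWhile (· == x), x < z := pv_dropWhile_gt x xs hs
    have hmemd : ∀ k, k ∈ (pvRunScan (xs.dropWhile (· == x))).1 → x < k := by
      intro k hk; exact hgt k ((ih2 k).1 hk)
    have htw : ∀ z ∈ xs.takeWhile (· == x), z = x := by
      intro z hz; simpa using List.mem_takeWhile_imp hz
    have hsplit : xs = xs.takeWhile (· == x) ++ xs.dropWhile (· == x) :=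
      (List.takeWhile_append_dropWhile).symm
    constructor
    · rw [pvRunScan]
      simp only [List.pairwise_cons]
      exact ⟨hmemd, ih1⟩
    constructor
    · intro k
      rw [pvRunScan]
      simp only [List.mem_cons, ih2]
      constructor
      · rintro (rfl | hk)
        · exact Or.inl rfl
        · exact Or.inr ((hsplit ▸ List.mem_append_right _) hk)
      · rintro (rfl | hk)
        · exact Or.inl rfl
        · rw [hsplit] at hk
          rcases List.mem_append.1 hk with h | h
          · exact Or.inl (htw k h)
          · exact Or.inr h
    · rw [pvRunScan]
      simp only [List.map_cons, List.cons.injEq]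
      constructor
      · -- run length = count of x in x :: xs
        have hcx : (xs.dropWhile (· == x)).count x = 0 := by
          rw [List.count_eq_zero]
          intro hmem
          exact absurd rfl (ne_of_gt (hgt x hmem))
        have hct : (xs.takeWhile (· == x)).count x = (xs.takeWhile (· == x)).length := by
          rw [List.count_eq_length]
          intro z hz; simpa using (htw z hz).symm
        rw [List.count_cons_self]
        conv_rhs => rw [hsplit]
        rw [List.count_append, hcx, hct]
        push_cast
        ring
      · rw [ih3]
        apply List.map_congr_left
        intro k hk
        have hxk : x < k := hmemd k hk
        have hzero : (xs.takeWhile (· == x)).count k = 0 :=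
          List.count_eq_zero.2 (fun hm => absurd (htw k hm) (by omega))
        have hcnt : xs.count k = (xs.dropWhile (· == x)).count k := by
          conv_lhs => rw [hsplit]
          rw [List.count_append, hzero, Nat.zero_add]
        congr 1
        rw [List.count_cons_of_ne (by omega)]
        exact hcnt.symm

-- the central fact: the run scan of sorted(L) is (sorted distinct keys, their counts in L)
theorem pv_runScan_eq (L : List Int) :
    pvRunScan (PySem.List.sorted L (fun x => x)) =
      (PySem.List.sorted (PySem.List.dedup L) (fun x => x),
       (PySem.List.sorted (PySem.List.dedup L) (fun x => x)).map (fun k => (L.count k : Int))) := by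
  set S := PySem.List.sorted L (fun x => x) with hS
  have hperm : S.Perm L := PySem.List.sorted_perm L (fun x => x) false
  have hsorted : S.Pairwise (· ≤ ·) := PySem.List.sorted_pairwise L (fun x => x)
  obtain ⟨h1, h2, h3⟩ := pv_runScan_sorted S hsorted
  have hnodup : (pvRunScan S).1.Nodup := h1.imp (fun {a b} h => ne_of_lt h)
  have hpermd : (pvRunScan S).1.Perm (PySem.List.dedup L) := by
    rw [List.perm_ext_iff_of_nodup hnodup (by simp)]
    intro a
    rw [h2, PySem.List.mem_dedup]
    exact hperm.mem_iff
  have hkeys : PySem.List.sorted (PySem.List.dedup L) (fun x => x) = (pvRunScan S).1 :=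
    PySem.List.sorted_eq_of_perm_of_pairwise_lt _ _ _ hpermd h1
  have hvals : (pvRunScan S).2 = (pvRunScan S).1.map (fun k => (L.count k : Int)) := by
    rw [h3]
    apply List.map_congr_left
    intro k _
    congr 1
    exact hperm.count_eq k
  rw [hkeys]
  exact Prod.ext rfl hvals

-- ===== VERDICT (by name: the statement is the Claim_ definition above) =====
theorem constructFrequencyDict_spec : Claim_equal_constructFrequencyDict := by
  intro dist _ _
  unfold Spec_constructFrequencyDict constructFrequencyDict constructFrequencyDict_alt
  simp only [pv_dict_eq_counter, pv_runScan_eq, PySem.Dict.keys_counter,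
    PySem.List.dedup_eq_ofList, PySem.List.foldl_append_singleton,
    PySem.List.foldl_append_singleton_eq_map, List.nil_append, PySem.Dict.getD_counter]
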